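-- pv_equiv track=rewrite | github.com/proglogic1/megasena | megasena/views.py | gerar
-- ===== SOURCE A (Python) =====
-- from itertools import combinations
--
-- def gerar(quantidade, dezenas):
--     # Converte as dezenas em inteiros
--     numeros = list(map(int, dezenas.split(',')))
--
--     # Gera as combinações
--     combinacoes_resultado = list(combinations(numeros, quantidade))
--
--     # Formata cada número nas combinações para ter dois dígitos
--     combinacoes_formatadas = [
--         tuple(str(num).zfill(2) for num in combinacao)  # Aplica zfill(2) em cada número da combinação
--         for combinacao in combinacoes_resultado
--     ]
--
--     return combinacoes_formatadas
-- ===== SOURCE B (Python) =====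
-- def _comb(tokens, need):
--     # choose 'need' elements keeping positional order (lexicographic by index)
--     if need == 0:
--         return [()]
--     if not tokens:
--         return []
--     first, rest = tokens[0], tokens[1:]
--     with_first = [(first,) + c for c in _comb(rest, need - 1)]
--     return with_first + _comb(rest, need)
--
-- def gerar(quantidade, dezenas):
--     # format each number once, up front, then combine the formatted strings
--     tokens = [str(int(t)).zfill(2) for t in dezenas.split(',')]
--     if quantidade < 0:
--         raise ValueError("r must be non-negative")
--     return _comb(tokens, quantidade)
-- ===== Notes on version B (the rewrite author's own statement) =====
-- stated objective: alternative
-- what changed: Replaces itertools.combinations plus per-tuple formatting with a hand-written pick-first/skip-first recursive combination generator over tokens that were parsed and zfill-formatted once up front.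
import Mathlib
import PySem

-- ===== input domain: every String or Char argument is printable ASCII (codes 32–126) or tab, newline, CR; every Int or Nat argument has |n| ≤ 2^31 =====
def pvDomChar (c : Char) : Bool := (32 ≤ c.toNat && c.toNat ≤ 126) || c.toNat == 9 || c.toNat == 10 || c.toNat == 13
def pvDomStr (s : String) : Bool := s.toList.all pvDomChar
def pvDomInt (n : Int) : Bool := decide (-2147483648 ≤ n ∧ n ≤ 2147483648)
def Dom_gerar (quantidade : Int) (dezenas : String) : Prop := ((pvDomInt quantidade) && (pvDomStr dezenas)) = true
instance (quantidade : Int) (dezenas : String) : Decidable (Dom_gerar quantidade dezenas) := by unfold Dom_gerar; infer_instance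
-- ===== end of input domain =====

-- B formats each number once up front and generates the combinations by hand
-- (pick-first / skip-first recursion) instead of itertools.combinations +
-- per-tuple formatting; objective: alternative decomposition, same results.

-- ===== PORT A =====
-- list(map(int, dezenas.split(','))): none = some int() raised ValueError (excluded by Pre_)
def parseInts : List String → Option (List Int)
  | [] => some []
  | t :: rest =>
    match PySem.Int.ofStr? t with
    | none => none
    | some n => (parseInts rest).map (n :: ·)

def gerar (quantidade : Int) (dezenas : String) : List (List String) :=
  match parseInts ((PySem.Str.split? dezenas ",").getD []) with
  | none => []   -- int() raised ValueError; outside Pre_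
  | some numeros =>
    if quantidade < 0 then []   -- combinations raises ValueError on negative r; outside Pre_
    else
      -- quantidade.toNat is exact here since 0 ≤ quantidade
      (PySem.List.combinations numeros quantidade.toNat).map
        (fun combinacao => combinacao.map (fun num => PySem.Str.zfill (PySem.Int.toStr num) 2))

-- ===== PORT B =====
-- [str(int(t)).zfill(2) for t in dezenas.split(',')]: none = int() raised (excluded by Pre_)
def parseTokens : List String → Option (List String)
  | [] => some []
  | t :: rest =>
    match PySem.Int.ofStr? t with
    | none => none
    | some n => (parseTokens rest).map (PySem.Str.zfill (PySem.Int.toStr n) 2 :: ·)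

def gerarComb (tokens : List String) (need : Int) : List (List String) :=
  if need = 0 then [[]]
  else
    match tokens with
    | [] => []
    | first :: rest =>
      (gerarComb rest (need - 1)).map (first :: ·) ++ gerarComb rest need
termination_by tokens.length

def gerar_alt (quantidade : Int) (dezenas : String) : List (List String) :=
  match parseTokens ((PySem.Str.split? dezenas ",").getD []) with
  | none => []   -- int() raised ValueError; outside Pre_
  | some tokens =>
    if quantidade < 0 then []   -- B raises ValueError on negative quantidade; outside Pre_
    else gerarComb tokens quantidade

-- ===== PRECONDITION & SPEC =====
-- Pre_ excludes exactly the inputs where A raises: a comma-piece int() rejects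
-- (ValueError) or a negative quantidade (ValueError from combinations).
def Pre_gerar (quantidade : Int) (dezenas : String) : Prop :=
  0 ≤ quantidade ∧
  ((PySem.Str.split? dezenas ",").getD []).all (fun t => (PySem.Int.ofStr? t).isSome) = true
instance (quantidade : Int) (dezenas : String) : Decidable (Pre_gerar quantidade dezenas) := by
  unfold Pre_gerar; infer_instance

def pvWitness_gerar : Int × String := (2, "1,2,3")

def Spec_gerar (quantidade : Int) (dezenas : String) (out : List (List String)) : Prop :=
  out = gerar_alt quantidade dezenas
instance (quantidade : Int) (dezenas : String) (out : List (List String)) : Decidable (Spec_gerar quantidade dezenas out) := by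
  unfold Spec_gerar; infer_instance

-- ===== CLAIM (what is proved, stated in full; the proofs are below) =====
def Claim_equal_gerar : Prop := ∀ (quantidade : Int) (dezenas : String), Dom_gerar quantidade dezenas → Pre_gerar quantidade dezenas → Spec_gerar quantidade dezenas (gerar quantidade dezenas)

-- ===== LEMMAS AND PROOFS =====

-- B's one-pass parse+format is A's parse followed by formatting each number.
theorem parseTokens_eq (l : List String) :
    parseTokens l = (parseInts l).map
      (List.map (fun num => PySem.Str.zfill (PySem.Int.toStr num) 2)) := by
  induction l with
  | nil => rfl
  | cons t rest ih =>
    simp only [parseTokens, parseInts]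
    cases PySem.Int.ofStr? t with
    | none => rfl
    | some n =>
      simp only [ih]
      cases parseInts rest <;> rfl

-- all pieces parse → parseInts succeeds
theorem parseInts_isSome (l : List String)
    (h : l.all (fun t => (PySem.Int.ofStr? t).isSome) = true) :
    ∃ ns, parseInts l = some ns := by
  induction l with
  | nil => exact ⟨[], rfl⟩
  | cons t rest ih =>
    simp only [List.all_cons, Bool.and_eq_true] at h
    obtain ⟨ns, hns⟩ := ih h.2
    obtain ⟨n, hn⟩ := Option.isSome_iff_exists.mp h.1
    exact ⟨n :: ns, by simp [parseInts, hn, hns]⟩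

-- B's pick-first / skip-first recursion is itertools.combinations
theorem gerarComb_eq (tokens : List String) (r : Nat) :
    gerarComb tokens (r : Int) = PySem.List.combinations tokens r := by
  induction tokens generalizing r with
  | nil =>
    cases r with
    | zero => simp [gerarComb, PySem.List.combinations_zero]
    | succ k =>
      simp only [gerarComb]
      rw [if_neg (by exact_mod_cast Nat.succ_ne_zero k)]
      simp [PySem.List.combinations_nil_succ]
  | cons first rest ih =>
    cases r with
    | zero => simp [gerarComb, PySem.List.combinations_zero]
    | succ k =>
      rw [PySem.List.combinations_cons_succ]
      simp only [gerarComb]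
      rw [if_neg (by exact_mod_cast Nat.succ_ne_zero k)]
      have hk : ((k + 1 : Nat) : Int) - 1 = ((k : Nat) : Int) := by push_cast; ring
      rw [hk, ih, ih]

-- the same, phrased for a non-negative Int count
theorem gerarComb_eq_toNat (tokens : List String) (q : Int) (hq : 0 ≤ q) :
    gerarComb tokens q = PySem.List.combinations tokens q.toNat := by
  have h := gerarComb_eq tokens q.toNat
  rwa [Int.toNat_of_nonneg hq] at h

-- ===== VERDICT (by name: the statement is the Claim_ definition above) =====
theorem gerar_spec : Claim_equal_gerar := by
  intro quantidade dezenas _ hpre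
  obtain ⟨hq, hall⟩ := hpre
  unfold Spec_gerar gerar gerar_alt
  obtain ⟨ns, hns⟩ := parseInts_isSome _ hall
  rw [hns, parseTokens_eq, hns]
  simp only [Option.map_some]
  rw [if_neg (by omega), if_neg (by omega)]
  rw [gerarComb_eq_toNat _ _ hq, PySem.List.combinations_map]
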